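-- pv_equiv track=rewrite | github.com/fabriciobarbosaviegas/Maratona | sbc/Maratona 2024/c.py | maximum_pieces
-- ===== SOURCE A (Python) =====
-- def maximum_pieces(N, M, intervals):
--     # Initialize a DP table
--     dp = [0] * (N + 1)
--
--     # Sort the intervals by their end point Ri
--     intervals.sort(key=lambda x: x[1])
--
--     # Array to store the last covering interval for each position
--     last_covered = [-1] * (N + 1)
--     idx = 0
--
--     # Fill last_covered array
--     for i in range(1, N):
--         while idx < M and intervals[idx][1] <= i:
--             idx += 1
--         if idx < M and intervals[idx][0] <= i:
--             last_covered[i] = idx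
--
--     for i in range(1, N + 1):
--         dp[i] = dp[i - 1] + 1
--         if last_covered[i] != -1:
--             dp[i] = min(dp[i], dp[intervals[last_covered[i]][0]] + 1)
--
--     return dp[N]
-- ===== SOURCE B (Python) =====
-- def maximum_pieces(N, M, intervals):
--     # Same in-place sort as the original (the caller observes the same mutation).
--     intervals.sort(key=lambda x: x[1])
--     K = min(M, len(intervals))
--     dp = [0] * (N + 1)
--     i = 1
--     # One fused sweep: positions are grouped by the interval that governs them
--     # (interval j governs the positions below its end and at/after the previous end),
--     # so no last_covered array and no separate precomputation pass is needed.
--     for j in range(K):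
--         lo, hi = intervals[j][0], intervals[j][1]
--         while i < min(hi, N):
--             dp[i] = dp[i - 1] + 1
--             if lo <= i:
--                 dp[i] = min(dp[i], dp[lo] + 1)
--             i += 1
--     while i <= N:
--         dp[i] = dp[i - 1] + 1
--         i += 1
--     return dp[N]
-- ===== Notes on version B (the rewrite author's own statement) =====
-- stated objective: alternative
-- what changed: Replaces A's two staged passes (a two-pointer sweep filling a last_covered array, then a per-position DP loop that consults it) with one fused sweep whose outer loop runs over the sorted intervals: each interval directly processes the block of positions it governs (between the previous end and its own end), so the last_covered array, the carried pointer and the second pass disappear.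
-- outside the precondition, e.g. on maximum_pieces(2, 1, [[-9, 1]]): A returns 2, B returns 2
import Mathlib
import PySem

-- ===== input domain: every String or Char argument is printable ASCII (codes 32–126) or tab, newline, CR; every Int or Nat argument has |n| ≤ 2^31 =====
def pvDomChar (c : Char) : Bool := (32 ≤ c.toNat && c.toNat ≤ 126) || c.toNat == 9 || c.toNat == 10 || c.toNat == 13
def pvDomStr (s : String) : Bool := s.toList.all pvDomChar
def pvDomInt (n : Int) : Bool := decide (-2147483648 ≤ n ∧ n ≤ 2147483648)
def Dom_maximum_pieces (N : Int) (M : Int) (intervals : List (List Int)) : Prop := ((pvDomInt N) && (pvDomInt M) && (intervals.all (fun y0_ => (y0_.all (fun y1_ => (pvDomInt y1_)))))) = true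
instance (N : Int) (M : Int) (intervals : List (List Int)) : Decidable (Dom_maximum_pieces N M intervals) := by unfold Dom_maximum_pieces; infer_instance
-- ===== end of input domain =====

-- B replaces A's two staged passes (two-pointer sweep filling a last_covered array, then
-- a per-position DP loop reading it) with one fused sweep whose outer loop runs over the
-- sorted intervals, each interval processing the block of positions it governs; no
-- last_covered array, no carried pointer, no second pass. Both versions sort `intervals`
-- in place; the equivalence proved is about the return value.

-- ===== PORT A =====
-- dp / last_covered are Python integer lists used as arrays; pvAGet / pvASet implement
-- Python list indexing (negative wraparound; out of range = the raising case, excluded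
-- by Pre_) on Lean arrays.
def pvAGet (a : Array Int) (i : Int) (d : Int) : Int :=
  if h : 0 ≤ i ∧ i < (a.size : Int) then a[i.toNat]'(by omega)
  else if h2 : -(a.size : Int) ≤ i ∧ i < 0 then a[(i + a.size).toNat]'(by omega) else d

def pvASet (a : Array Int) (i : Int) (v : Int) : Array Int :=
  if h : 0 ≤ i ∧ i < (a.size : Int) then a.set i.toNat v (by omega)
  else if h2 : -(a.size : Int) ≤ i ∧ i < 0 then a.set (i + a.size).toNat v (by omega) else a

-- iv[1] / iv[0]; the default is never reached under Pre_ (every interval has length ≥ 2)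
def pvEndKey (iv : List Int) : Int := PySem.List.pyGetD iv 1 0
def pvStartOf (iv : List Int) : Int := PySem.List.pyGetD iv 0 0

-- `while idx < M and intervals[idx][1] <= i: idx += 1`
def pvAdvance (intervals : List (List Int)) (M : Int) (i : Int) (idx : Int) : Int :=
  if h : idx < M ∧ pvEndKey (PySem.List.pyGetD intervals idx []) ≤ i then
    pvAdvance intervals M i (idx + 1)
  else idx
termination_by (M - idx).toNat
decreasing_by omega

def maximum_pieces (N : Int) (M : Int) (intervals : List (List Int)) : Int :=
  let dp0 : Array Int := Array.replicate (N + 1).toNat 0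
  let ivs := PySem.List.sorted intervals pvEndKey false
  let lc0 : Array Int := Array.replicate (N + 1).toNat (-1)
  let st := (PySem.List.pyRange 1 N 1).foldl (fun (st : Array Int × Int) i =>
      let idx := pvAdvance ivs M i st.2
      if idx < M ∧ pvStartOf (PySem.List.pyGetD ivs idx []) ≤ i then
        (pvASet st.1 i idx, idx)
      else (st.1, idx)) (lc0, 0)
  let lc := st.1
  let dp := (PySem.List.pyRange 1 (N + 1) 1).foldl (fun dp i =>
      let dp := pvASet dp i (pvAGet dp (i - 1) 0 + 1)
      if pvAGet lc i 0 ≠ -1 then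
        pvASet dp i (min (pvAGet dp i 0)
          (pvAGet dp (pvStartOf (PySem.List.pyGetD ivs (pvAGet lc i 0) [])) 0 + 1))
      else dp) dp0
  pvAGet dp N 0

-- ===== PORT B =====
-- `while i < min(hi, N): dp[i] = dp[i-1]+1; if lo <= i: dp[i] = min(dp[i], dp[lo]+1); i += 1`
-- (structural recursion on the exact number of remaining iterations, (stop - i).toNat)
def pvBInnerGo : Nat → Array Int → Int → Int → Int → Array Int × Int
  | Nat.zero, dp, i, _stop, _lo => (dp, i)
  | Nat.succ n, dp, i, stop, lo =>
      let dp1 := pvASet dp i (pvAGet dp (i - 1) 0 + 1)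
      let dp2 := if lo ≤ i then
          pvASet dp1 i (min (pvAGet dp1 i 0) (pvAGet dp1 lo 0 + 1))
        else dp1
      pvBInnerGo n dp2 (i + 1) stop lo

def pvBInner (dp : Array Int) (i : Int) (stop : Int) (lo : Int) : Array Int × Int :=
  pvBInnerGo (stop - i).toNat dp i stop lo

-- `while i <= N: dp[i] = dp[i-1]+1; i += 1`  (fuel = (N + 1 - i).toNat iterations)
def pvBTailGo : Nat → Array Int → Int → Int → Array Int
  | Nat.zero, dp, _i, _N => dp
  | Nat.succ n, dp, i, N => pvBTailGo n (pvASet dp i (pvAGet dp (i - 1) 0 + 1)) (i + 1) N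

def pvBTail (dp : Array Int) (i : Int) (N : Int) : Array Int :=
  pvBTailGo (N + 1 - i).toNat dp i N

def maximum_pieces_alt (N : Int) (M : Int) (intervals : List (List Int)) : Int :=
  let ivs := PySem.List.sorted intervals pvEndKey false
  let dp0 : Array Int := Array.replicate (N + 1).toNat 0
  let st := (PySem.List.pyRange 0 (min M (ivs.length : Int)) 1).foldl
      (fun (st : Array Int × Int) j =>
        let iv := PySem.List.pyGetD ivs j []
        pvBInner st.1 st.2 (min (pvEndKey iv) N) (pvStartOf iv)) (dp0, 1)
  pvAGet (pvBTail st.1 st.2 N) N 0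

-- ===== PRECONDITION & SPEC =====
-- Pre_ excludes the inputs on which Python A raises an IndexError (negative N, an
-- interval of length < 2, M > len(intervals) with every end below N-1 so the two-pointer
-- scan runs off the list) and, conservatively, a left endpoint below -(N+1), which makes
-- A raise whenever that interval is consulted (see cites).
def Pre_maximum_pieces (N : Int) (M : Int) (intervals : List (List Int)) : Prop :=
  0 ≤ N ∧ (∀ iv ∈ intervals, 2 ≤ iv.length ∧ -(N + 1) ≤ PySem.List.pyGetD iv 0 0) ∧
    (M ≤ (intervals.length : Int) ∨ N ≤ 1 ∨ ∃ iv ∈ intervals, N - 1 < pvEndKey iv)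
instance (N : Int) (M : Int) (intervals : List (List Int)) : Decidable (Pre_maximum_pieces N M intervals) := by unfold Pre_maximum_pieces; infer_instance

def pvWitness_maximum_pieces : Int × Int × List (List Int) := (3, 2, [[1, 3], [2, 4]])

def Spec_maximum_pieces (N : Int) (M : Int) (intervals : List (List Int)) (out : Int) : Prop := out = maximum_pieces_alt N M intervals
instance (N : Int) (M : Int) (intervals : List (List Int)) (out : Int) : Decidable (Spec_maximum_pieces N M intervals out) := by unfold Spec_maximum_pieces; infer_instance

-- ===== CLAIM (what is proved, stated in full; the proofs are below) =====
def Claim_equal_maximum_pieces : Prop := ∀ (N : Int) (M : Int) (intervals : List (List Int)), Dom_maximum_pieces N M intervals → Pre_maximum_pieces N M intervals → Spec_maximum_pieces N M intervals (maximum_pieces N M intervals)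

-- ===== LEMMAS AND PROOFS =====

-- `last_covered[i]` as determined by the input: the first end-sorted interval whose end
-- exceeds i (bisectRight), if its index is < M and it starts at or before i.
def pvG (S : List (List Int)) (M : Int) (i : Int) : Int :=
  let c : Int := (PySem.List.bisectRight (S.map pvEndKey) i : Int)
  if c < M ∧ pvStartOf (PySem.List.pyGetD S c []) ≤ i then c else -1

-- one canonical per-position DP step; both ports' loops are shown to fold pvF
def pvF (S : List (List Int)) (M : Int) (N : Int) (dp : Array Int) (i : Int) : Array Int :=
  let dp1 := pvASet dp i (pvAGet dp (i - 1) 0 + 1)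
  if i < N ∧ pvG S M i ≠ -1 then
    pvASet dp1 i (min (pvAGet dp1 i 0)
      (pvAGet dp1 (pvStartOf (PySem.List.pyGetD S (pvG S M i) [])) 0 + 1))
  else dp1

theorem pv_bisect_mono (xs : List Int) (h : xs.Pairwise (· ≤ ·)) {a b : Int} (hab : a ≤ b) :
    PySem.List.bisectRight xs a ≤ PySem.List.bisectRight xs b := by
  by_contra hlt
  push Not at hlt
  obtain ⟨hlen, hlow, hhigh⟩ := PySem.List.bisectRight_spec xs a h
  obtain ⟨hlen', hlow', hhigh'⟩ := PySem.List.bisectRight_spec xs b h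
  have hj : PySem.List.bisectRight xs b < xs.length := lt_of_lt_of_le hlt hlen
  have h1 := hlow _ hj hlt
  have h2 := hhigh' _ hj le_rfl
  omega

theorem pv_advance_aux (S : List (List Int)) (M i : Int)
    (hs : (S.map pvEndKey).Pairwise (· ≤ ·))
    (hsafe : (PySem.List.bisectRight (S.map pvEndKey) i : Int) < (S.length : Int) ∨
      M ≤ (S.length : Int)) :
    ∀ (n : Nat) (idx : Int), (M - idx).toNat ≤ n → 0 ≤ idx → idx ≤ max M 0 →
      idx ≤ (PySem.List.bisectRight (S.map pvEndKey) i : Int) →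
      pvAdvance S M i idx = max (min M (PySem.List.bisectRight (S.map pvEndKey) i : Int)) 0 := by
  obtain ⟨hble, hlow, hhigh⟩ := PySem.List.bisectRight_spec (S.map pvEndKey) i hs
  have hlenE : (S.map pvEndKey).length = S.length := by simp
  intro n
  induction n with
  | zero =>
    intro idx hf h0 hiM hic
    rw [pvAdvance, dif_neg]
    · omega
    · rintro ⟨h1, -⟩; omega
  | succ n ih =>
    intro idx hf h0 hiM hic
    by_cases h1 : idx < M
    · have hidx : idx.toNat < (S.map pvEndKey).length := by
        rcases hsafe with hsafe | hsafe <;> omega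
      have hkey : pvEndKey (PySem.List.pyGetD S idx []) = (S.map pvEndKey)[idx.toNat] := by
        rw [PySem.List.pyGetD_eq_getElem S [] h0 (by omega), List.getElem_map]
      by_cases h2 : pvEndKey (PySem.List.pyGetD S idx []) ≤ i
      · rw [pvAdvance, dif_pos ⟨h1, h2⟩]
        have hlt : idx.toNat < PySem.List.bisectRight (S.map pvEndKey) i := by
          by_contra hge
          have := hhigh idx.toNat hidx (by omega)
          rw [hkey] at h2; omega
        exact ih (idx + 1) (by omega) (by omega) (by omega) (by omega)
      · rw [pvAdvance, dif_neg (fun hc => h2 hc.2)]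
        rw [hkey] at h2
        have hge : ¬ idx.toNat < PySem.List.bisectRight (S.map pvEndKey) i :=
          fun hlt => h2 (hlow idx.toNat hidx hlt)
        omega
    · rw [pvAdvance, dif_neg (fun hc => h1 hc.1)]
      omega

theorem pv_advance_eq (S : List (List Int)) (M i idx : Int)
    (hs : (S.map pvEndKey).Pairwise (· ≤ ·))
    (hsafe : (PySem.List.bisectRight (S.map pvEndKey) i : Int) < (S.length : Int) ∨
      M ≤ (S.length : Int))
    (h0 : 0 ≤ idx) (hiM : idx ≤ max M 0)
    (hic : idx ≤ (PySem.List.bisectRight (S.map pvEndKey) i : Int)) :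
    pvAdvance S M i idx = max (min M (PySem.List.bisectRight (S.map pvEndKey) i : Int)) 0 :=
  pv_advance_aux S M i hs hsafe (M - idx).toNat idx le_rfl h0 hiM hic

theorem pvASet_size (a : Array Int) (i v : Int) : (pvASet a i v).size = a.size := by
  unfold pvASet
  split_ifs <;> simp

theorem pvAGet_set (a : Array Int) (q p v : Int)
    (h0 : 0 ≤ q) (hq : q < (a.size : Int)) (hp0 : 0 ≤ p) :
    pvAGet (pvASet a q v) p 0 = if p = q then v else pvAGet a p 0 := by
  have hset : pvASet a q v = a.set q.toNat v (by omega) := by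
    unfold pvASet
    rw [dif_pos ⟨h0, hq⟩]
  rw [hset]
  unfold pvAGet
  simp only [Array.size_set]
  by_cases hp : p < (a.size : Int)
  · rw [dif_pos ⟨hp0, hp⟩, dif_pos ⟨hp0, hp⟩, Array.getElem_set]
    rcases eq_or_ne p q with h | h
    · rw [if_pos (by omega), if_pos h]
    · rw [if_neg (by omega), if_neg h]
  · rw [dif_neg (by omega), dif_neg (by omega), dif_neg (by omega), dif_neg (by omega),
      if_neg (by omega)]

theorem pvAGet_replicate (n : Nat) (v p : Int) (h0 : 0 ≤ p) (hp : p < (n : Int)) :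
    pvAGet (Array.replicate n v) p 0 = v := by
  unfold pvAGet
  rw [dif_pos ⟨h0, by simpa using hp⟩]
  simp

theorem pv_lc_fold (S : List (List Int)) (M N t : Int)
    (hs : (S.map pvEndKey).Pairwise (· ≤ ·))
    (hsafe : ∀ pos : Int, 1 ≤ pos → pos ≤ N - 1 →
      (PySem.List.bisectRight (S.map pvEndKey) pos : Int) < (S.length : Int) ∨
      M ≤ (S.length : Int))
    (hN : 0 ≤ N) (h1 : 1 ≤ t) (ht : t ≤ N) :
    ∃ lc idx,
      (PySem.List.pyRange 1 t 1).foldl (fun (st : Array Int × Int) i =>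
        let idx := pvAdvance S M i st.2
        if idx < M ∧ pvStartOf (PySem.List.pyGetD S idx []) ≤ i then
          (pvASet st.1 i idx, idx)
        else (st.1, idx)) (Array.replicate (N + 1).toNat (-1), 0) = (lc, idx) ∧
      lc.size = (N + 1).toNat ∧
      (∀ p : Int, 1 ≤ p → p ≤ N →
        pvAGet lc p 0 = if p < t then pvG S M p else -1) ∧
      0 ≤ idx ∧ idx ≤ max M 0 ∧
      idx ≤ (PySem.List.bisectRight (S.map pvEndKey) t : Int) := by
  revert ht
  induction t, h1 using Int.le_induction with
  | base =>
    intro ht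
    refine ⟨Array.replicate (N + 1).toNat (-1), 0, ?_, by simp, ?_, by omega, by omega, by omega⟩
    · rw [PySem.List.pyRange_one_eq_nil le_rfl]; rfl
    · intro p hp1 hpN
      rw [if_neg (by omega)]
      exact pvAGet_replicate _ _ _ (by omega) (by omega)
  | succ t h1 IH =>
    intro ht
    obtain ⟨lc, idx, heq, hlen, hval, hi0, hiM, hic⟩ := IH (by omega)
    have hmono := pv_bisect_mono (S.map pvEndKey) hs (show t ≤ t + 1 by omega)
    rw [PySem.List.pyRange_one_succ_right (by omega : (1:Int) ≤ t), List.foldl_append, heq]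
    simp only [List.foldl_cons, List.foldl_nil]
    rw [pv_advance_eq S M t idx hs (hsafe t (by omega) (by omega)) hi0 hiM hic]
    by_cases hcM : (PySem.List.bisectRight (S.map pvEndKey) t : Int) < M
    · have hidx' : max (min M (PySem.List.bisectRight (S.map pvEndKey) t : Int)) 0 =
          (PySem.List.bisectRight (S.map pvEndKey) t : Int) := by omega
      rw [hidx']
      by_cases hstart :
          pvStartOf (PySem.List.pyGetD S (PySem.List.bisectRight (S.map pvEndKey) t : Int) []) ≤ t
      · rw [if_pos ⟨hcM, hstart⟩]
        refine ⟨_, _, rfl, by rw [pvASet_size]; exact hlen, ?_, by omega, by omega, by omega⟩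
        intro p hp1 hpN
        rw [pvAGet_set lc t p _ (by omega) (by omega) (by omega)]
        rcases eq_or_ne p t with hpt | hpt
        · subst hpt
          rw [if_pos rfl, if_pos (by omega)]
          simp only [pvG]
          rw [if_pos ⟨hcM, hstart⟩]
        · rw [if_neg hpt, hval p hp1 hpN]
          rcases lt_or_ge p t with hlt | hgt
          · rw [if_pos hlt, if_pos (by omega)]
          · rw [if_neg (by omega), if_neg (by omega)]
      · rw [if_neg (fun hc => hstart hc.2)]
        refine ⟨_, _, rfl, hlen, ?_, by omega, by omega, by omega⟩
        intro p hp1 hpN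
        rw [hval p hp1 hpN]
        rcases eq_or_ne p t with hpt | hpt
        · subst hpt
          rw [if_neg (by omega), if_pos (by omega)]
          simp only [pvG]
          rw [if_neg (fun hc => hstart hc.2)]
        · rcases lt_or_ge p t with hlt | hgt
          · rw [if_pos hlt, if_pos (by omega)]
          · rw [if_neg (by omega), if_neg (by omega)]
    · have hidx' : max (min M (PySem.List.bisectRight (S.map pvEndKey) t : Int)) 0 = max M 0 := by
        omega
      rw [hidx']
      rw [if_neg (fun hc => hcM (by omega))]
      refine ⟨_, _, rfl, hlen, ?_, by omega, by omega, by omega⟩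
      intro p hp1 hpN
      rw [hval p hp1 hpN]
      rcases eq_or_ne p t with hpt | hpt
      · subst hpt
        rw [if_neg (by omega), if_pos (by omega)]
        simp only [pvG]
        rw [if_neg (fun hc => hcM hc.1)]
      · rcases lt_or_ge p t with hlt | hgt
        · rw [if_pos hlt, if_pos (by omega)]
        · rw [if_neg (by omega), if_neg (by omega)]

-- A's dp pass equals the fold of pvF (the lc array carries exactly pvG)
theorem pvA_fold_eq_F (S : List (List Int)) (M N : Int) (lc : Array Int) (dp : Array Int)
    (hval : ∀ p : Int, 1 ≤ p → p ≤ N → pvAGet lc p 0 = if p < N then pvG S M p else -1) :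
    (PySem.List.pyRange 1 (N + 1) 1).foldl (fun dp i =>
      let dp := pvASet dp i (pvAGet dp (i - 1) 0 + 1)
      if pvAGet lc i 0 ≠ -1 then
        pvASet dp i (min (pvAGet dp i 0)
          (pvAGet dp (pvStartOf (PySem.List.pyGetD S (pvAGet lc i 0) [])) 0 + 1))
      else dp) dp
    = (PySem.List.pyRange 1 (N + 1) 1).foldl (pvF S M N) dp := by
  apply PySem.List.foldl_congr_mem
  intro dp i hi
  rw [PySem.List.mem_pyRange_one] at hi
  have hvi := hval i (by omega) (by omega)
  simp only [pvF]
  by_cases hiN : i < N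
  · rw [hvi, if_pos hiN]
    by_cases hg : pvG S M i = -1
    · rw [hg, if_neg (by omega : ¬ ((-1 : Int) ≠ -1)), if_neg (fun hc => hc.2 rfl)]
    · rw [if_pos hg, if_pos ⟨hiN, hg⟩]
  · rw [hvi, if_neg hiN, if_neg (by omega : ¬ ((-1 : Int) ≠ -1)),
      if_neg (fun hc => hiN hc.1)]

-- bisectRight characterized by its bracketing position
theorem pv_bisect_eq (xs : List Int) (h : xs.Pairwise (· ≤ ·)) (pos : Int) (t : Nat)
    (ht : t ≤ xs.length)
    (hlowt : ∀ k : Nat, (hk : k < xs.length) → k < t → xs[k] ≤ pos)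
    (hhight : ∀ hk : t < xs.length, pos < xs[t]) :
    PySem.List.bisectRight xs pos = t := by
  obtain ⟨hlen, hlow, hhigh⟩ := PySem.List.bisectRight_spec xs pos h
  rcases Nat.lt_trichotomy (PySem.List.bisectRight xs pos) t with hlt | heq | hgt
  · have h1 := hhigh (PySem.List.bisectRight xs pos) (by omega) le_rfl
    have h2 := hlowt (PySem.List.bisectRight xs pos) (by omega) hlt
    omega
  · exact heq
  · have h1 := hlow t (by omega) hgt
    have h2 := hhight (by omega)
    omega

-- end of interval j, as an element of the mapped ends list
theorem pv_end_getElem (S : List (List Int)) (j : Int) (h0 : 0 ≤ j) (hj : j < (S.length : Int)) :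
    pvEndKey (PySem.List.pyGetD S j []) = (S.map pvEndKey)[j.toNat]'(by simp; omega) := by
  rw [PySem.List.pyGetD_eq_getElem S [] h0 (by omega), List.getElem_map]

theorem pv_ends_mono (S : List (List Int)) (hs : (S.map pvEndKey).Pairwise (· ≤ ·))
    {a b : Int} (h0 : 0 ≤ a) (hab : a ≤ b) (hb : b < (S.length : Int)) :
    pvEndKey (PySem.List.pyGetD S a []) ≤ pvEndKey (PySem.List.pyGetD S b []) := by
  rw [pv_end_getElem S a h0 (by omega), pv_end_getElem S b (by omega) hb]
  rcases eq_or_lt_of_le hab with h | h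
  · subst h; rfl
  · exact (List.pairwise_iff_getElem.mp hs) a.toNat b.toNat (by simp; omega) (by simp; omega)
      (by omega)

-- a position below some end is bracketed strictly inside the ends list
theorem pv_bisect_lt_of_mem (S : List (List Int)) (pos : Int)
    (hs : (S.map pvEndKey).Pairwise (· ≤ ·)) (k : Nat) (hk : k < S.length)
    (hgt : pos < (S.map pvEndKey)[k]'(by simpa using hk)) :
    PySem.List.bisectRight (S.map pvEndKey) pos < (S.map pvEndKey).length := by
  obtain ⟨hlen, hlow, hhigh⟩ := PySem.List.bisectRight_spec (S.map pvEndKey) pos hs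
  by_contra hge
  have hk' : k < (S.map pvEndKey).length := by simpa using hk
  have := hlow k hk' (by omega)
  omega

-- in the block of positions governed by interval t, pvG is t (when its start reaches pos)
theorem pvG_segment (S : List (List Int)) (M : Int) (t pos : Int)
    (hs : (S.map pvEndKey).Pairwise (· ≤ ·))
    (h0 : 0 ≤ t) (htM : t < M) (htlen : t < (S.length : Int))
    (hlow : ∀ k : Int, 0 ≤ k → k < t → pvEndKey (PySem.List.pyGetD S k []) ≤ pos)
    (hhigh : pos < pvEndKey (PySem.List.pyGetD S t [])) :
    pvG S M pos = if pvStartOf (PySem.List.pyGetD S t []) ≤ pos then t else -1 := by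
  have hb : PySem.List.bisectRight (S.map pvEndKey) pos = t.toNat := by
    apply pv_bisect_eq _ hs _ _ (by simp; omega)
    · intro k hk hkt
      have := hlow (k : Int) (by omega) (by omega)
      rw [pv_end_getElem S k (by omega) (by simp at hk; omega)] at this
      simpa using this
    · intro hk
      rw [pv_end_getElem S t h0 (by omega)] at hhigh
      simpa using hhigh
  simp only [pvG, hb]
  have hcast : ((t.toNat : Nat) : Int) = t := by omega
  rw [hcast, if_congr (iff_of_eq (congrArg _ rfl)) rfl rfl]
  by_cases hst : pvStartOf (PySem.List.pyGetD S t []) ≤ pos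
  · rw [if_pos ⟨by omega, hst⟩, if_pos hst]
  · rw [if_neg (fun hc => hst hc.2), if_neg hst]

-- past the last considered end (or with M ≤ 0) no interval governs pos
theorem pvG_none (S : List (List Int)) (M pos : Int)
    (hs : (S.map pvEndKey).Pairwise (· ≤ ·)) (hM : M ≤ (S.length : Int))
    (h : M ≤ 0 ∨ (1 ≤ M ∧ pvEndKey (PySem.List.pyGetD S (M - 1) []) ≤ pos)) :
    pvG S M pos = -1 := by
  simp only [pvG]
  rw [if_neg]
  rintro ⟨hcM, -⟩
  rcases h with h | ⟨h1, h2⟩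
  · omega
  · obtain ⟨hlen, hlow, hhigh⟩ := PySem.List.bisectRight_spec (S.map pvEndKey) pos hs
    have hc : PySem.List.bisectRight (S.map pvEndKey) pos < (S.map pvEndKey).length := by
      simp; omega
    have hgt := hhigh _ hc le_rfl
    have hle : (S.map pvEndKey)[PySem.List.bisectRight (S.map pvEndKey) pos] ≤
        pvEndKey (PySem.List.pyGetD S (M - 1) []) := by
      rw [pv_end_getElem S (M - 1) (by omega) (by omega)]
      rcases Nat.lt_or_ge (PySem.List.bisectRight (S.map pvEndKey) pos) (M - 1).toNat with hlt | hge
      · exact (List.pairwise_iff_getElem.mp hs) _ _ hc (by simp; omega) hlt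
      · have heq : PySem.List.bisectRight (S.map pvEndKey) pos = (M - 1).toNat := by omega
        simp only [heq, le_refl]
    omega

-- the inner while loop folds pvF over its block of positions
theorem pvBInner_aux (S : List (List Int)) (M N lo stop : Int) :
    ∀ (n : Nat) (dp : Array Int) (i : Int), (stop - i).toNat = n →
      (∀ pos : Int, i ≤ pos → pos < stop → pos < N ∧
        (lo ≤ pos → pvG S M pos ≠ -1 ∧
          pvStartOf (PySem.List.pyGetD S (pvG S M pos) []) = lo) ∧
        (¬ lo ≤ pos → pvG S M pos = -1)) →
      pvBInnerGo n dp i stop lo =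
        ((PySem.List.pyRange i stop 1).foldl (pvF S M N) dp, max i stop) := by
  intro n
  induction n with
  | zero =>
    intro dp i hf hyp
    rw [PySem.List.pyRange_one_eq_nil (by omega)]
    simp only [pvBInnerGo, List.foldl_nil]
    have : max i stop = i := by omega
    rw [this]
  | succ n ih =>
    intro dp i hf hyp
    have h : i < stop := by omega
    obtain ⟨hiN, h1, h2⟩ := hyp i le_rfl h
    have hstep : (if lo ≤ i then
          pvASet (pvASet dp i (pvAGet dp (i - 1) 0 + 1)) i
            (min (pvAGet (pvASet dp i (pvAGet dp (i - 1) 0 + 1)) i 0)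
              (pvAGet (pvASet dp i (pvAGet dp (i - 1) 0 + 1)) lo 0 + 1))
        else pvASet dp i (pvAGet dp (i - 1) 0 + 1)) = pvF S M N dp i := by
      simp only [pvF]
      by_cases hlo : lo ≤ i
      · obtain ⟨hg, hst⟩ := h1 hlo
        rw [if_pos hlo, if_pos ⟨hiN, hg⟩, hst]
      · rw [if_neg hlo, if_neg (fun hc => hlo (by rw [h2 hlo] at hc; omega))]
    rw [PySem.List.pyRange_one_cons h]
    simp only [pvBInnerGo, List.foldl_cons]
    rw [hstep, ih (pvF S M N dp i) (i + 1) (by omega)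
      (fun pos hp1 hp2 => hyp pos (by omega) hp2)]
    have hmax : max (i + 1) stop = max i stop := by omega
    rw [hmax]

theorem pvBInner_eq (S : List (List Int)) (M N lo stop : Int) (dp : Array Int) (i : Int)
    (hyp : ∀ pos : Int, i ≤ pos → pos < stop → pos < N ∧
        (lo ≤ pos → pvG S M pos ≠ -1 ∧
          pvStartOf (PySem.List.pyGetD S (pvG S M pos) []) = lo) ∧
        (¬ lo ≤ pos → pvG S M pos = -1)) :
    pvBInner dp i stop lo =
      ((PySem.List.pyRange i stop 1).foldl (pvF S M N) dp, max i stop) :=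
  pvBInner_aux S M N lo stop (stop - i).toNat dp i rfl hyp

-- the tail while loop folds pvF over the uncovered positions
theorem pvBTail_aux (S : List (List Int)) (M N : Int) :
    ∀ (n : Nat) (dp : Array Int) (i : Int), (N + 1 - i).toNat = n →
      (∀ pos : Int, i ≤ pos → pos < N → pvG S M pos = -1) →
      pvBTailGo n dp i N = (PySem.List.pyRange i (N + 1) 1).foldl (pvF S M N) dp := by
  intro n
  induction n with
  | zero =>
    intro dp i hf hyp
    rw [PySem.List.pyRange_one_eq_nil (by omega)]
    simp only [pvBTailGo, List.foldl_nil]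
  | succ n ih =>
    intro dp i hf hyp
    have h : i ≤ N := by omega
    have hstep : pvASet dp i (pvAGet dp (i - 1) 0 + 1) = pvF S M N dp i := by
      simp only [pvF]
      rw [if_neg]
      rintro ⟨hiN, hg⟩
      exact hg (hyp i le_rfl hiN)
    rw [PySem.List.pyRange_one_cons (by omega : i < N + 1)]
    simp only [pvBTailGo, List.foldl_cons]
    rw [hstep, ih _ (i + 1) (by omega) (fun pos hp1 hp2 => hyp pos (by omega) hp2)]

theorem pvBTail_eq (S : List (List Int)) (M N : Int) (dp : Array Int) (i : Int)
    (hyp : ∀ pos : Int, i ≤ pos → pos < N → pvG S M pos = -1) :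
    pvBTail dp i N = (PySem.List.pyRange i (N + 1) 1).foldl (pvF S M N) dp :=
  pvBTail_aux S M N (N + 1 - i).toNat dp i rfl hyp

-- i after interval t-1 (1 ≤ t): one past the last position governed so far
def pvI (S : List (List Int)) (N t : Int) : Int :=
  max 1 (min (pvEndKey (PySem.List.pyGetD S (t - 1) [])) N)

-- positions of interval t's block satisfy pvBInner_eq's hypothesis
theorem pv_block_hyp (S : List (List Int)) (M N t : Int)
    (hs : (S.map pvEndKey).Pairwise (· ≤ ·)) (htlen : t < (S.length : Int))
    (h0 : 0 ≤ t) (htM : t < M) (i0 : Int)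
    (hi0 : ∀ k : Int, 0 ≤ k → k < t → min (pvEndKey (PySem.List.pyGetD S k [])) N ≤ i0) :
    ∀ pos : Int, i0 ≤ pos → pos < min (pvEndKey (PySem.List.pyGetD S t [])) N → pos < N ∧
      (pvStartOf (PySem.List.pyGetD S t []) ≤ pos → pvG S M pos ≠ -1 ∧
        pvStartOf (PySem.List.pyGetD S (pvG S M pos) []) = pvStartOf (PySem.List.pyGetD S t [])) ∧
      (¬ pvStartOf (PySem.List.pyGetD S t []) ≤ pos → pvG S M pos = -1) := by
  intro pos hpos1 hpos2
  have hposN : pos < N := by omega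
  have hseg : pvG S M pos = if pvStartOf (PySem.List.pyGetD S t []) ≤ pos then t else -1 := by
    apply pvG_segment S M t pos hs h0 htM htlen
    · intro k hk0 hkt
      have := hi0 k hk0 hkt
      omega
    · omega
  refine ⟨hposN, ?_, ?_⟩
  · intro hlo
    rw [hseg, if_pos hlo]
    exact ⟨by omega, rfl⟩
  · intro hlo
    rw [hseg, if_neg hlo]

theorem pv_range_clamp (a b : Int) :
    PySem.List.pyRange a b 1 = PySem.List.pyRange a (max a b) 1 := by
  by_cases h : a ≤ b
  · rw [max_eq_right h]
  · rw [PySem.List.pyRange_one_eq_nil (by omega), PySem.List.pyRange_one_eq_nil (by omega)]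

theorem pv_outer (S : List (List Int)) (M N K : Int)
    (hs : (S.map pvEndKey).Pairwise (· ≤ ·)) (hKM : K ≤ M) (hKlen : K ≤ (S.length : Int))
    (hN : 1 ≤ N) :
    ∀ t : Int, 1 ≤ t → t ≤ K →
      (PySem.List.pyRange 0 t 1).foldl (fun (st : Array Int × Int) j =>
        let iv := PySem.List.pyGetD S j []
        pvBInner st.1 st.2 (min (pvEndKey iv) N) (pvStartOf iv))
        (Array.replicate (N + 1).toNat 0, 1) =
      ((PySem.List.pyRange 1 (pvI S N t) 1).foldl (pvF S M N)
        (Array.replicate (N + 1).toNat 0), pvI S N t) := by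
  intro t h1 ht
  induction t, h1 using Int.le_induction with
  | base =>
    rw [PySem.List.pyRange_one_cons (by omega : (0:Int) < 1)]
    have h01 : (0:Int) + 1 = 1 := by norm_num
    rw [h01, PySem.List.pyRange_one_eq_nil (by omega : (1:Int) ≤ 1)]
    simp only [List.foldl_cons, List.foldl_nil]
    rw [pvBInner_eq S M N _ _ _ _
      (pv_block_hyp S M N 0 hs (by omega) le_rfl (by omega) 1 (by omega))]
    have hI : pvI S N 1 = max 1 (min (pvEndKey (PySem.List.pyGetD S 0 [])) N) := by
      rw [pvI]
      norm_num
    rw [hI, pv_range_clamp]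
  | succ t h1 IH =>
    have htM : t < M := by omega
    have htlen : t < (S.length : Int) := by omega
    have hIH := IH (by omega)
    rw [PySem.List.pyRange_one_succ_right (by omega : (0:Int) ≤ t), List.foldl_append, hIH]
    simp only [List.foldl_cons, List.foldl_nil]
    have hi0 : ∀ k : Int, 0 ≤ k → k < t →
        min (pvEndKey (PySem.List.pyGetD S k [])) N ≤ pvI S N t := by
      intro k hk0 hkt
      have hmono := pv_ends_mono S hs hk0 (by omega : k ≤ t - 1)
        (by omega : t - 1 < (S.length : Int))
      rw [pvI]
      omega
    rw [pvBInner_eq S M N _ _ _ _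
      (pv_block_hyp S M N t hs htlen (by omega) htM (pvI S N t) hi0)]
    have hm1 : min (pvEndKey (PySem.List.pyGetD S (t - 1) [])) N ≤
        min (pvEndKey (PySem.List.pyGetD S t [])) N := by
      have := pv_ends_mono S hs (by omega : (0:Int) ≤ t - 1) (by omega : t - 1 ≤ t)
        (by omega : t < (S.length : Int))
      omega
    have hImax : max (pvI S N t) (min (pvEndKey (PySem.List.pyGetD S t [])) N) =
        pvI S N (t + 1) := by
      rw [pvI, pvI]
      have ht1 : t + 1 - 1 = t := by omega
      rw [ht1]
      omega
    rw [pv_range_clamp (pvI S N t), hImax, ← List.foldl_append,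
      ← PySem.List.pyRange_one_append 1 (pvI S N t) (pvI S N (t + 1))
        (by rw [pvI]; omega) (by rw [← hImax]; omega)]

theorem pv_outer_nil (S : List (List Int)) (N : Int) (hN : N ≤ 0) (l : List Int) (dp : Array Int) :
    l.foldl (fun (st : Array Int × Int) j =>
      let iv := PySem.List.pyGetD S j []
      pvBInner st.1 st.2 (min (pvEndKey iv) N) (pvStartOf iv)) (dp, 1) = (dp, 1) := by
  induction l generalizing dp with
  | nil => rfl
  | cons x xs ih =>
    simp only [List.foldl_cons, pvBInner]
    have h0 : (min (pvEndKey (PySem.List.pyGetD S x [])) N - 1).toNat = 0 := by omega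
    rw [h0]
    exact ih dp

-- ===== VERDICT (by name: the statement is the Claim_ definition above) =====
theorem maximum_pieces_spec : Claim_equal_maximum_pieces := by
  intro N M intervals _hDom hPre
  obtain ⟨hN, _hwf, hP3⟩ := hPre
  unfold Spec_maximum_pieces
  have hs : ((PySem.List.sorted intervals pvEndKey false).map pvEndKey).Pairwise (· ≤ ·) :=
    PySem.List.sorted_map_key_pairwise _ _
  have hlen : ((PySem.List.sorted intervals pvEndKey false).length : Int) =
      (intervals.length : Int) := by
    rw [PySem.List.length_sorted]
  simp only [maximum_pieces, maximum_pieces_alt]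
  rcases eq_or_lt_of_le hN with hN0 | hN1
  · -- N = 0: all loops are empty on both sides
    have hN0' : N = 0 := hN0.symm
    subst hN0'
    rw [pv_outer_nil _ _ le_rfl]
    simp only
    simp only [pvBTail]
    have h0 : ((0:Int) + 1 - 1).toNat = 0 := by omega
    rw [h0]
    simp [pvBTailGo, PySem.List.pyRange_one_eq_nil]
  · -- N ≥ 1: A's advance never runs off the scanned prefix on Pre_
    have hsafeA : ∀ pos : Int, 1 ≤ pos → pos ≤ N - 1 →
        (PySem.List.bisectRight ((PySem.List.sorted intervals pvEndKey false).map pvEndKey)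
          pos : Int) < ((PySem.List.sorted intervals pvEndKey false).length : Int) ∨
        M ≤ ((PySem.List.sorted intervals pvEndKey false).length : Int) := by
      intro pos hp1 hp2
      rcases hP3 with h | h | ⟨iv, hmem, hend⟩
      · right; omega
      · exact absurd hp2 (by omega)
      · left
        have hmem' : iv ∈ PySem.List.sorted intervals pvEndKey false := by
          rw [PySem.List.mem_sorted]; exact hmem
        obtain ⟨k, hk, hkeq⟩ := List.mem_iff_getElem.mp hmem'
        have hb := pv_bisect_lt_of_mem (PySem.List.sorted intervals pvEndKey false) pos hs k hk
          (by rw [List.getElem_map, hkeq]; omega)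
        simp only [List.length_map] at hb
        omega
    obtain ⟨lc, idxf, heq, hlenlc, hval, -, -, -⟩ :=
      pv_lc_fold (PySem.List.sorted intervals pvEndKey false) M N N hs hsafeA hN hN1 le_rfl
    rw [heq]
    simp only
    rw [pvA_fold_eq_F (PySem.List.sorted intervals pvEndKey false) M N lc _ hval]
    by_cases hK1 : 1 ≤ min M ((PySem.List.sorted intervals pvEndKey false).length : Int)
    · -- at least one interval is scanned
      rw [pv_outer (PySem.List.sorted intervals pvEndKey false) M N
        (min M ((PySem.List.sorted intervals pvEndKey false).length : Int)) hs
        (min_le_left _ _) (min_le_right _ _) hN1 _ hK1 le_rfl]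
      simp only
      have hIb : 1 ≤ pvI (PySem.List.sorted intervals pvEndKey false) N
            (min M ((PySem.List.sorted intervals pvEndKey false).length : Int)) ∧
          pvI (PySem.List.sorted intervals pvEndKey false) N
            (min M ((PySem.List.sorted intervals pvEndKey false).length : Int)) ≤ N := by
        rw [pvI]; omega
      have htail : ∀ pos : Int,
          pvI (PySem.List.sorted intervals pvEndKey false) N
            (min M ((PySem.List.sorted intervals pvEndKey false).length : Int)) ≤ pos →
          pos < N → pvG (PySem.List.sorted intervals pvEndKey false) M pos = -1 := by
        intro pos hp1 hp2
        by_cases hMlen : M ≤ ((PySem.List.sorted intervals pvEndKey false).length : Int)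
        · have hKM : min M ((PySem.List.sorted intervals pvEndKey false).length : Int) = M :=
            min_eq_left hMlen
          apply pvG_none _ _ _ hs hMlen
          right
          refine ⟨by omega, ?_⟩
          rw [hKM, pvI] at hp1
          omega
        · exfalso
          rcases hP3 with h | h | ⟨iv, hmem, hend⟩
          · omega
          · omega
          · have hKlen : min M ((PySem.List.sorted intervals pvEndKey false).length : Int) =
                ((PySem.List.sorted intervals pvEndKey false).length : Int) :=
              min_eq_right (by omega)
            have hmem' : iv ∈ PySem.List.sorted intervals pvEndKey false := by
              rw [PySem.List.mem_sorted]; exact hmem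
            obtain ⟨k, hk, hkeq⟩ := List.mem_iff_getElem.mp hmem'
            have hmono := pv_ends_mono (PySem.List.sorted intervals pvEndKey false) hs
              (by omega : (0:Int) ≤ (k : Int))
              (by omega : (k : Int) ≤
                ((PySem.List.sorted intervals pvEndKey false).length : Int) - 1)
              (by omega)
            rw [PySem.List.pyGetD_eq_getElem _ [] (by omega) (by simpa using hk)] at hmono
            simp only [Int.toNat_natCast] at hmono
            rw [hkeq] at hmono
            rw [hKlen, pvI] at hp1
            omega
      rw [pvBTail_eq (PySem.List.sorted intervals pvEndKey false) M N _ _ htail,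
        ← List.foldl_append,
        ← PySem.List.pyRange_one_append 1
          (pvI (PySem.List.sorted intervals pvEndKey false) N
            (min M ((PySem.List.sorted intervals pvEndKey false).length : Int)))
          (N + 1) (by omega) (by omega)]
    · -- no interval is scanned: every position is uncovered
      rw [PySem.List.pyRange_one_eq_nil
        (by omega : min M ((PySem.List.sorted intervals pvEndKey false).length : Int) ≤ 0)]
      simp only [List.foldl_nil]
      have htail : ∀ pos : Int, (1:Int) ≤ pos → pos < N →
          pvG (PySem.List.sorted intervals pvEndKey false) M pos = -1 := by
        intro pos hp1 hp2
        by_cases hM0 : M ≤ 0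
        · exact pvG_none _ _ _ hs (by omega) (Or.inl hM0)
        · exfalso
          rcases hP3 with h | h | ⟨iv, hmem, hend⟩
          · omega
          · omega
          · have hmem' : iv ∈ PySem.List.sorted intervals pvEndKey false := by
              rw [PySem.List.mem_sorted]; exact hmem
            have hpos := List.length_pos_of_mem hmem'
            omega
      rw [pvBTail_eq (PySem.List.sorted intervals pvEndKey false) M N _ _ htail]
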